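-- pv_equiv track=rewrite | github.com/PythonGoesReddit/Reddit_MDA | Reddit_Bibers_Features.py | feature_52
-- ===== SOURCE A (Python) =====
-- def feature_52(untagged_list):
--     """This function takes a list of words without PoS tags as input and returns the number of items
--     that are possibility modals."""
--     counter = 0
--     possmodalslist = ["can", "might", "may", "could"]
--     for item in untagged_list:
--         if item in possmodalslist:
--             counter = counter + 1
--         else:
--             pass
--     return(counter)
-- ===== SOURCE B (Python) =====
-- def feature_52(untagged_list):
--     """Staged passes: for each of the four possibility modals, count its
--     occurrences in the whole input with list.count, and sum the four counts."""
--     items = list(untagged_list)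
--     total = 0
--     for word in ("can", "might", "may", "could"):
--         total += items.count(word)
--     return total
-- ===== Notes on version B (the rewrite author's own statement) =====
-- stated objective: alternative
-- what changed: Inverts the traversal: instead of one pass over the items with a membership test against the four modals, B loops over the four modal words and for each counts its occurrences over the whole list (four staged counting passes), summing the counts.
import Mathlib
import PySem

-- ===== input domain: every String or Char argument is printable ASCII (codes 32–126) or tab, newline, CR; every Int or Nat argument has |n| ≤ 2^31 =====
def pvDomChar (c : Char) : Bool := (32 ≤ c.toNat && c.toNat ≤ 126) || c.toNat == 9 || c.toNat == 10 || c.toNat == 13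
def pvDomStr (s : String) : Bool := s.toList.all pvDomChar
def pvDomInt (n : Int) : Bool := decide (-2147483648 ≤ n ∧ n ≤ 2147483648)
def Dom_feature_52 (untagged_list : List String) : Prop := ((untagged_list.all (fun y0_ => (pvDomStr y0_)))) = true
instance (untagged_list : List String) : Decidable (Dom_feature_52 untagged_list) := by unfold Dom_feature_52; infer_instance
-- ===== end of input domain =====

-- B inverts the traversal: it loops over the four modal words, counting each over the whole list, instead of A's single pass with a membership test (alternative decomposition).


-- ===== PORT A =====
def feature_52 (untagged_list : List String) : Int :=
  let possmodalslist : List String := ["can", "might", "may", "could"]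
  untagged_list.foldl (fun counter item =>
    if item ∈ possmodalslist then counter + 1 else counter) 0

-- ===== PORT B =====
def feature_52_alt (untagged_list : List String) : Int :=
  let items := untagged_list
  (["can", "might", "may", "could"] : List String).foldl
    (fun total word => total + (PySem.List.count items word : Int)) 0

-- ===== PRECONDITION & SPEC =====
def Spec_feature_52 (untagged_list : List String) (out : Int) : Prop := out = feature_52_alt untagged_list
instance (untagged_list : List String) (out : Int) : Decidable (Spec_feature_52 untagged_list out) := by unfold Spec_feature_52; infer_instance

-- ===== CLAIM (what is proved, stated in full; the proofs are below) =====
def Claim_equal_feature_52 : Prop := ∀ (untagged_list : List String), Dom_feature_52 untagged_list → Spec_feature_52 untagged_list (feature_52 untagged_list)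

-- ===== LEMMAS AND PROOFS =====

-- A's loop computes the sum of the four per-word counts.
theorem feature_52_loop (xs : List String) (c : Int) :
    xs.foldl (fun counter item =>
      if item ∈ (["can", "might", "may", "could"] : List String) then counter + 1 else counter) c
    = c + xs.count "can" + xs.count "might" + xs.count "may" + xs.count "could" := by
  induction xs generalizing c with
  | nil => simp
  | cons x xs ih =>
    simp only [List.foldl_cons, ih, List.count_cons]
    by_cases h1 : x = "can" <;> by_cases h2 : x = "might" <;> by_cases h3 : x = "may" <;>
      by_cases h4 : x = "could" <;>
      simp_all [List.mem_cons] <;> ring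

-- ===== VERDICT (by name: the statement is the Claim_ definition above) =====
theorem feature_52_spec : Claim_equal_feature_52 := by
  intro xs _
  show feature_52 xs = feature_52_alt xs
  simp only [feature_52, feature_52_alt]
  rw [feature_52_loop]
  simp [PySem.List.count, List.foldl]
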